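-- pv_equiv track=rewrite | github.com/GuttmanLab/sprite2.0-pipeline | scripts/python/cluster_format_conversion.py | classify_feature
-- ===== SOURCE A (Python) =====
-- def classify_feature(features):
--     '''classify features
--
--     Args:
--         features(list): List of features to classify
--     '''
--
--     c_feature = {'exon':'NA', 'intron':'NA', 'repeat':'NA'}
--
--     for f in features:
--         if f.endswith('exon'):
--             c_feature['exon'] = f
--         elif f.endswith('intron'):
--             c_feature['intron'] = f
--         elif f.endswith('none'):
--             continue
--         elif not f.endswith('exon|intron|none') or f.endswith('repeat'):
--             if len(f) > 0:
--                 c_feature['repeat'] = f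
--
--     return c_feature
-- ===== SOURCE B (Python) =====
-- def classify_feature(features):
--     '''classify features
--
--     Args:
--         features(list): List of features to classify
--     '''
--     feats = list(features)
--
--     def last(pred):
--         return next((f for f in reversed(feats) if pred(f)), 'NA')
--
--     return {
--         'exon': last(lambda f: f.endswith('exon')),
--         'intron': last(lambda f: f.endswith('intron')),
--         'repeat': last(lambda f: len(f) > 0
--                        and not f.endswith('exon')
--                        and not f.endswith('intron')
--                        and not f.endswith('none')),
--     }
-- ===== Notes on version B (the rewrite author's own statement) =====
-- stated objective: alternative
-- what changed: Replaces the single accumulating overwrite loop over a dict with three independent predicate-keyed reverse last-match searches, one per category, assembled into the result dict.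
import Mathlib
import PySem

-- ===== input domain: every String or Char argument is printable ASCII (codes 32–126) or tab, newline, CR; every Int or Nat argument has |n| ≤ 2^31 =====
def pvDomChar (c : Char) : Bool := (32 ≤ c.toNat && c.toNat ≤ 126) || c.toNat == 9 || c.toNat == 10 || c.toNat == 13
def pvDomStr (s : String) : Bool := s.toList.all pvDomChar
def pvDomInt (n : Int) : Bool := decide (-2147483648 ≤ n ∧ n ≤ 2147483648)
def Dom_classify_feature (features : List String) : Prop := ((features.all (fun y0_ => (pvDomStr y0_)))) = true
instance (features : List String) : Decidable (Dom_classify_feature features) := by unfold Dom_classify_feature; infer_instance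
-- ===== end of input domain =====

-- B replaces A's single overwrite loop over a dict by three independent reverse
-- last-match searches (one predicate per category); same cost, different decomposition.

-- ===== PORT A =====
def classify_feature (features : List String) : List (String × String) :=
  let c : PySem.Dict String String :=
    PySem.Dict.ofList [("exon", "NA"), ("intron", "NA"), ("repeat", "NA")]
  let c := features.foldl (fun c f =>
    if PySem.Str.endswith f "exon" then c.insert "exon" f
    else if PySem.Str.endswith f "intron" then c.insert "intron" f
    else if PySem.Str.endswith f "none" then c
    else if (!PySem.Str.endswith f "exon|intron|none") || PySem.Str.endswith f "repeat" then
      (if PySem.Str.len f > 0 then c.insert "repeat" f else c)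
    else c) c
  c.items

-- ===== PORT B =====
-- last pred = next((f for f in reversed(feats) if pred(f)), 'NA')
def pvLast (feats : List String) (pred : String → Bool) : String :=
  (feats.reverse.find? pred).getD "NA"

def classify_feature_alt (features : List String) : List (String × String) :=
  let feats := features
  [("exon",   pvLast feats (fun f => PySem.Str.endswith f "exon")),
   ("intron", pvLast feats (fun f => PySem.Str.endswith f "intron")),
   ("repeat", pvLast feats (fun f =>
      decide (PySem.Str.len f > 0)
      && !PySem.Str.endswith f "exon"
      && !PySem.Str.endswith f "intron"
      && !PySem.Str.endswith f "none"))]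

-- ===== PRECONDITION & SPEC =====
def Spec_classify_feature (features : List String) (out : List (String × String)) : Prop := out = classify_feature_alt features
instance (features : List String) (out : List (String × String)) : Decidable (Spec_classify_feature features out) := by unfold Spec_classify_feature; infer_instance

-- ===== CLAIM (what is proved, stated in full; the proofs are below) =====
def Claim_equal_classify_feature : Prop := ∀ (features : List String), Dom_classify_feature features → Spec_classify_feature features (classify_feature features)

-- ===== LEMMAS AND PROOFS =====

theorem pv_getD_find?_append (l : List String) (x : String) (p : String → Bool) (v : String) :
    ((l ++ [x]).find? p).getD v = (l.find? p).getD (if p x then x else v) := by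
  cases h : l.find? p with
  | none => by_cases hx : p x <;> simp [List.find?_append, h, hx]
  | some w => simp [List.find?_append, h]

theorem pv_none_of_bar (f : String)
    (h : PySem.Str.endswith f "exon|intron|none" = true) :
    PySem.Str.endswith f "none" = true := by
  simp only [PySem.Str.endswith_eq] at h ⊢
  rw [PySem.Chars.endswith_iff] at h ⊢
  exact List.IsSuffix.trans (by decide) h

theorem pv_loop (l : List String) (e i r : String) :
    (l.foldl (fun c f =>
      if PySem.Str.endswith f "exon" then c.insert "exon" f
      else if PySem.Str.endswith f "intron" then c.insert "intron" f
      else if PySem.Str.endswith f "none" then c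
      else if (!PySem.Str.endswith f "exon|intron|none") || PySem.Str.endswith f "repeat" then
        (if PySem.Str.len f > 0 then c.insert "repeat" f else c)
      else c)
      (PySem.Dict.mk [("exon", e), ("intron", i), ("repeat", r)])).items =
    [("exon",   (l.reverse.find? (fun f => PySem.Str.endswith f "exon")).getD e),
     ("intron", (l.reverse.find? (fun f => PySem.Str.endswith f "intron")).getD i),
     ("repeat", (l.reverse.find? (fun f =>
        decide (PySem.Str.len f > 0)
        && !PySem.Str.endswith f "exon"
        && !PySem.Str.endswith f "intron"
        && !PySem.Str.endswith f "none")).getD r)] := by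
  induction l generalizing e i r with
  | nil => rfl
  | cons x xs ih =>
    simp only [List.foldl_cons, List.reverse_cons, pv_getD_find?_append]
    by_cases hE : PySem.Str.endswith x "exon" = true
    · have hins : (PySem.Dict.mk [("exon", e), ("intron", i), ("repeat", r)]).insert "exon" x
          = PySem.Dict.mk [("exon", x), ("intron", i), ("repeat", r)] := by
        apply PySem.Dict.ext; simp [PySem.Dict.items_insert]
      have hI : PySem.Str.endswith x "intron" = false := by
        rw [Bool.eq_false_iff]
        intro hc
        rw [PySem.Str.endswith_eq, PySem.Chars.endswith_iff] at hE hc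
        have hE' : ['e','x','o','n'] <:+ x.toList := hE
        have hc' : ['i','n','t','r','o','n'] <:+ x.toList := hc
        obtain ⟨u, hu⟩ := hE'
        obtain ⟨t, ht⟩ := hc'
        have e1 : x.toList.reverse[2]? = some 'x' := by rw [← hu]; simp [List.reverse_append]
        have e2 : x.toList.reverse[2]? = some 'r' := by rw [← ht]; simp [List.reverse_append]
        rw [e1] at e2; simp at e2
      simp only [hE, hI, if_true, hins, ih, Bool.not_true, Bool.false_and, Bool.and_false,
        Bool.false_eq_true, if_false]
    · by_cases hI : PySem.Str.endswith x "intron" = true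
      · have hins : (PySem.Dict.mk [("exon", e), ("intron", i), ("repeat", r)]).insert "intron" x
            = PySem.Dict.mk [("exon", e), ("intron", x), ("repeat", r)] := by
          apply PySem.Dict.ext; simp [PySem.Dict.items_insert]
        simp only [hE, hI, if_true, hins, ih, Bool.not_true, Bool.false_and, Bool.and_false,
          Bool.false_eq_true, if_false]
      · by_cases hN : PySem.Str.endswith x "none" = true
        · simp only [hE, hI, hN, ih, if_true, Bool.not_true, Bool.and_false, Bool.false_eq_true,
            if_false]
        · have hbar : PySem.Str.endswith x "exon|intron|none" = false := by
            cases h : PySem.Str.endswith x "exon|intron|none"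
            · rfl
            · exact absurd (pv_none_of_bar x h) hN
          by_cases hL : PySem.Str.len x > 0
          · have hins : (PySem.Dict.mk [("exon", e), ("intron", i), ("repeat", r)]).insert "repeat" x
                = PySem.Dict.mk [("exon", e), ("intron", i), ("repeat", x)] := by
              apply PySem.Dict.ext; simp [PySem.Dict.items_insert]
            simp only [hE, hI, hN, hbar, if_pos hL, decide_eq_true hL, hins, ih, if_true, Bool.not_false,
              Bool.true_or, Bool.and_true, Bool.false_eq_true, if_false]
          · simp only [hE, hI, hN, hbar, if_neg hL, decide_eq_false hL, ih, if_true, Bool.not_false,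
              Bool.true_or, Bool.false_and, Bool.false_eq_true, if_false]

theorem classify_feature_spec : Claim_equal_classify_feature := by
  intro features _
  unfold Spec_classify_feature classify_feature classify_feature_alt pvLast
  have h := pv_loop features "NA" "NA" "NA"
  simpa [PySem.Dict.ofList] using h
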